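-- pv_equiv track=rewrite | github.com/harmoniccomputing/Coursework | AT/Student_work/ProgramAssignment/q1/prng.py.py | run_dfa
-- ===== SOURCE A (Python) =====
-- def initialize_frequency(N):
--   frequency = {}
--   for state in range(1, N + 1):
--     frequency[state] = 0
--   return frequency
--
-- def run_dfa(N, S, X, machine):
--   current_state = S
--   frequency = initialize_frequency(N)
--   step = 0
--   while step < X:
--   #frequency[current_state] = frequency[current_state] + 1
--     if current_state in machine:
--       next_state = machine[current_state][0]
--       temp_curr_state= current_state
--       current_state = next_state
--       frequency[temp_curr_state] += 1
--     else:
--       break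
--     step = step + 1
--   return frequency
-- ===== SOURCE B (Python) =====
-- def run_dfa(N, S, X, machine):
--     # Walk the functional graph, recording first-visit positions, until a
--     # state repeats, the walk leaves the machine, or X steps are reached.
--     seen = {}
--     order = []
--     cur = S
--     rep = None
--     while len(order) < X:
--         if cur in seen:
--             rep = seen[cur]
--             break
--         if cur not in machine:
--             break
--         nxt = machine[cur][0]
--         seen[cur] = len(order)
--         order.append(cur)
--         cur = nxt
--     counts = {k: 0 for k in range(1, N + 1)}
--     if rep is None:
--         for s in order:
--             counts[s] += 1
--     else:
--         c = len(order) - rep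
--         q = (X - rep) // c
--         r = (X - rep) % c
--         for s in order[:rep]:
--             counts[s] += 1
--         for i, s in enumerate(order[rep:]):
--             counts[s] += q + (1 if i < r else 0)
--     return counts
-- ===== Notes on version B (the rewrite author's own statement) =====
-- stated objective: alternative
-- what changed: Instead of simulating all X steps one by one, B walks the functional graph only until a state repeats (at most min(X, #states)+1 steps), then computes each state's visit count in closed form from the tail and cycle lengths via divmod.
-- outside the precondition, e.g. on run_dfa(1, 1, 2, {1: [1], 2: []}): A returns {1: 2}, B returns {1: 2}
import Mathlib
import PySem

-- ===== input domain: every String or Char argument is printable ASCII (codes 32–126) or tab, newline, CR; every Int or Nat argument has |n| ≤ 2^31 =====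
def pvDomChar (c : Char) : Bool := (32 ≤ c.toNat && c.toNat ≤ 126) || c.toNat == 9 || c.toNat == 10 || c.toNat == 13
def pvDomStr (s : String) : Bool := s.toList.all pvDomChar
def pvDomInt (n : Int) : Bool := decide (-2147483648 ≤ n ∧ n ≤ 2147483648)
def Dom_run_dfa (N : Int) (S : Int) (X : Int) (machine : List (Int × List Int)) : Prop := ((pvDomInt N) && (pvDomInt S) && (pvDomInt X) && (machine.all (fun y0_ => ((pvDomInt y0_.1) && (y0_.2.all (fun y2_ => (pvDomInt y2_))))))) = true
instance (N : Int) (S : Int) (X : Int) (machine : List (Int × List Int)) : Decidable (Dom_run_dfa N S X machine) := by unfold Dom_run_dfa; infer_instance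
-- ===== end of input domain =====

-- B replaces A's step-by-step simulation of all X transitions by a walk to the first
-- repeated state (rho / tail+cycle detection) followed by closed-form tail/cycle counting
-- via divmod (an alternative algorithm; same measured cost on the tested input family).


-- ===== PORT A =====
def initialize_frequency (N : Int) : PySem.Dict Int Int :=
  (PySem.List.pyRange 1 (N + 1) 1).foldl (fun frequency state => frequency.insert state 0)
    (PySem.Dict.mk [])

-- the 'while step < X' loop; fuel = X.toNat is the number of remaining iterations.
-- A 'none' of an inner match is where the Python raises (IndexError / KeyError); excluded by Pre_.
def run_dfa_loop (machine : List (Int × List Int)) :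
    Nat → Int → PySem.Dict Int Int → PySem.Dict Int Int
  | 0, _, frequency => frequency
  | Nat.succ fuel, current_state, frequency =>
    match PySem.Dict.get? (PySem.Dict.mk machine) current_state with
    | none => frequency
    | some lst =>
      match PySem.List.pyGet? lst 0 with
      | none => frequency
      | some next_state =>
        match frequency.get? current_state with
        | none => frequency
        | some v => run_dfa_loop machine fuel next_state (frequency.insert current_state (v + 1))

def run_dfa (N : Int) (S : Int) (X : Int) (machine : List (Int × List Int)) : List (Int × Int) :=
  (run_dfa_loop machine X.toNat S (initialize_frequency N)).items

-- ===== PORT B =====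
-- phase 1: walk recording first-visit indices until repeat / exit / X steps (fuel = X.toNat).
def run_dfa_walk (machine : List (Int × List Int)) :
    Nat → Int → PySem.Dict Int Int → List Int → List Int × Option Int
  | 0, _, _, order => (order, none)
  | Nat.succ fuel, cur, seen, order =>
    match seen.get? cur with
    | some p => (order, some p)
    | none =>
      match PySem.Dict.get? (PySem.Dict.mk machine) cur with
      | none => (order, none)
      | some lst =>
        match PySem.List.pyGet? lst 0 with
        | none => (order, none)  -- IndexError in Python; excluded by Pre_
        | some nxt => run_dfa_walk machine fuel nxt (seen.insert cur (order.length : Int)) (order ++ [cur])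

def run_dfa_alt (N : Int) (S : Int) (X : Int) (machine : List (Int × List Int)) : List (Int × Int) :=
  let res := run_dfa_walk machine X.toNat S (PySem.Dict.mk []) []
  let order := res.1
  let counts := (PySem.List.pyRange 1 (N + 1) 1).foldl (fun d k => d.insert k 0) (PySem.Dict.mk [])
  match res.2 with
  | none => (order.foldl (fun d s => d.modify s 0 (· + 1)) counts).items
  | some rep =>
    let c : Int := (order.length : Int) - rep
    let q := PySem.Int.floordiv (X - rep) c
    let r := PySem.Int.mod (X - rep) c
    let counts1 := (PySem.List.slice order none (some rep)).foldl (fun d s => d.modify s 0 (· + 1)) counts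
    let counts2 := (PySem.List.enumerate (PySem.List.slice order (some rep) none) 0).foldl
        (fun d p => d.modify p.2 0 (· + (q + (if p.1 < r then 1 else 0)))) counts1
    counts2.items

-- ===== PRECONDITION & SPEC =====
-- Pre_ excludes the runs where A raises: incrementing the counter of a visited state outside
-- 1..N (KeyError) or reading a transition from an empty list (IndexError).  The guard is the
-- closed-form global one — when X > 0 and S is a machine key, every machine entry must be
-- nonempty with its target, if itself a machine key, in 1..N, and S in 1..N — so it also
-- excludes some inputs whose ill-formed entries are unreachable, on which A and B agree.
def Pre_run_dfa (N : Int) (S : Int) (X : Int) (machine : List (Int × List Int)) : Prop :=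
  X ≤ 0 ∨ (PySem.Dict.get? (PySem.Dict.mk machine) S).isSome = false ∨
    ((1 ≤ S ∧ S ≤ N) ∧
      ∀ kv ∈ machine, kv.2 ≠ [] ∧
        ((PySem.Dict.get? (PySem.Dict.mk machine) kv.2.headI).isSome = true →
          1 ≤ kv.2.headI ∧ kv.2.headI ≤ N))
instance (N : Int) (S : Int) (X : Int) (machine : List (Int × List Int)) : Decidable (Pre_run_dfa N S X machine) := by unfold Pre_run_dfa; infer_instance

def pvWitness_run_dfa : Int × Int × Int × (List (Int × List Int)) := (3, 1, 10, [(1, [2]), (2, [1])])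

def Spec_run_dfa (N : Int) (S : Int) (X : Int) (machine : List (Int × List Int)) (out : List (Int × Int)) : Prop := out = run_dfa_alt N S X machine
instance (N : Int) (S : Int) (X : Int) (machine : List (Int × List Int)) (out : List (Int × Int)) : Decidable (Spec_run_dfa N S X machine out) := by unfold Spec_run_dfa; infer_instance

-- ===== CLAIM (what is proved, stated in full; the proofs are below) =====
def Claim_equal_run_dfa : Prop := ∀ (N : Int) (S : Int) (X : Int) (machine : List (Int × List Int)), Dom_run_dfa N S X machine → Pre_run_dfa N S X machine → Spec_run_dfa N S X machine (run_dfa N S X machine)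

-- ===== LEMMAS AND PROOFS =====

def pvStep (m : List (Int × List Int)) (s : Int) : Option Int :=
  match PySem.Dict.get? (PySem.Dict.mk m) s with
  | none => none
  | some lst => PySem.List.pyGet? lst 0
def pvVisits (m : List (Int × List Int)) : Nat → Int → List Int
  | 0, _ => []
  | n + 1, s => match pvStep m s with | none => [] | some t => s :: pvVisits m n t
def pvIter (m : List (Int × List Int)) : Nat → Int → Option Int
  | 0, s => some s
  | n + 1, s => match pvStep m s with | none => none | some t => pvIter m n t

theorem pvIter_add (m : List (Int × List Int)) (a b : Nat) :
    ∀ s, pvIter m (a + b) s = (pvIter m a s).bind (pvIter m b) := by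
  induction a with
  | zero => intro s; simp [pvIter]
  | succ a ih =>
    intro s
    have : a + 1 + b = (a + b) + 1 := by omega
    rw [this]
    cases h : pvStep m s with
    | none => simp [pvIter, h]
    | some t => simp [pvIter, h, ih t]

theorem pvVisits_split (m : List (Int × List Int)) (a b : Nat) :
    ∀ s s', pvIter m a s = some s' →
      pvVisits m (a + b) s = pvVisits m a s ++ pvVisits m b s' := by
  induction a with
  | zero => intro s s' h; simp [pvIter] at h; simp [pvVisits, h]
  | succ a ih =>
    intro s s' h
    have e : a + 1 + b = (a + b) + 1 := by omega
    rw [e]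
    cases hs : pvStep m s with
    | none => simp [pvIter, hs] at h
    | some t =>
      simp only [pvIter, hs] at h
      simp [pvVisits, hs, ih t s' h]

theorem pvVisits_prefix (m : List (Int × List Int)) (a : Nat) :
    ∀ n s, a ≤ n → pvVisits m a s = (pvVisits m n s).take a := by
  induction a with
  | zero => intro n s _; simp [pvVisits]
  | succ a ih =>
    intro n s h
    obtain ⟨n', rfl⟩ : ∃ n', n = n' + 1 := ⟨n - 1, by omega⟩
    cases hs : pvStep m s with
    | none => simp [pvVisits, hs]
    | some t => simp [pvVisits, hs, ih n' t (by omega)]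

theorem pvVisits_length (m : List (Int × List Int)) (n : Nat) :
    ∀ s c, pvIter m n s = some c → (pvVisits m n s).length = n := by
  induction n with
  | zero => intro s c _; simp [pvVisits]
  | succ n ih =>
    intro s c h
    cases hs : pvStep m s with
    | none => simp [pvIter, hs] at h
    | some t =>
      simp only [pvIter, hs] at h
      simp [pvVisits, hs, ih t c h]


theorem pvSet_update_self (s l : List Int) (h : ∀ x ∈ l, x ∈ s) : PySem.Set.update s l = s := by
  induction l generalizing s with
  | nil => rfl
  | cons x xs ih =>
    have hx : PySem.Set.add s x = s := by
      simp [PySem.Set.add, PySem.Set.contains, h x (by simp)]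
    show PySem.Set.update (PySem.Set.add s x) xs = s
    rw [hx]; exact ih s (fun y hy => h y (by simp [hy]))

theorem pvIter_isSome_le (m : List (Int × List Int)) (n : Nat) (s : Int) (c : Int)
    (h : pvIter m n s = some c) : ∀ j ≤ n, (pvIter m j s).isSome := by
  intro j hj
  obtain ⟨b, rfl⟩ : ∃ b, n = j + b := ⟨n - j, by omega⟩
  rw [pvIter_add] at h
  cases hij : pvIter m j s with
  | none => rw [hij] at h; simp at h
  | some _ => simp

theorem pvIter_getElem (m : List (Int × List Int)) (t : Nat) (S : Int) (c : Int)
    (h : pvIter m t S = some c) :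
    ∀ j, j < t → ∃ x, pvIter m j S = some x ∧ (pvVisits m t S)[j]? = some x := by
  intro j hj
  have hsome := pvIter_isSome_le m t S c h j (by omega)
  cases hij : pvIter m j S with
  | none => rw [hij] at hsome; simp at hsome
  | some sj =>
    refine ⟨sj, rfl, ?_⟩
    obtain ⟨b, rfl⟩ : ∃ b, t = j + b := ⟨t - j, by omega⟩
    have hsplit := pvVisits_split m j b S sj hij
    have hlenj : (pvVisits m j S).length = j := pvVisits_length m j S sj hij
    obtain ⟨b', rfl⟩ : ∃ b', b = b' + 1 := ⟨b - 1, by omega⟩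
    have hbit : pvIter m (j + (b' + 1)) S = some c := h
    rw [pvIter_add, hij] at hbit
    simp only [Option.bind_some] at hbit
    cases hstep : pvStep m sj with
    | none => rw [pvIter, hstep] at hbit; simp at hbit
    | some u =>
      have hv : pvVisits m (b' + 1) sj = sj :: pvVisits m b' u := by rw [pvVisits, hstep]
      rw [hsplit, hv, List.getElem?_append_right (by omega), hlenj]
      simp

theorem pvStep_some (m : List (Int × List Int)) (s t : Int) (h : pvStep m s = some t) :
    (PySem.Dict.get? (PySem.Dict.mk m) s).isSome = true ∧ ∃ kv ∈ m, kv.2.headI = t := by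
  unfold pvStep at h
  cases hg : PySem.Dict.get? (PySem.Dict.mk m) s with
  | none => rw [hg] at h; simp at h
  | some lst =>
    rw [hg] at h
    refine ⟨by simp, ?_⟩
    have hfind : ∃ p, List.find? (fun p => p.1 == s) m = some p ∧ p.2 = lst := by
      simp only [PySem.Dict.get?] at hg
      cases hf : List.find? (fun p => p.1 == s) m with
      | none => rw [hf] at hg; simp at hg
      | some p => rw [hf] at hg; simp at hg; exact ⟨p, rfl, hg⟩
    obtain ⟨p, hf, rfl⟩ := hfind
    refine ⟨p, List.mem_of_find?_eq_some hf, ?_⟩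
    cases hl : p.2 with
    | nil => rw [hl] at h; simp [PySem.List.pyGet?, PySem.List.pyIdx?] at h
    | cons a tl =>
      rw [hl] at h
      simp [PySem.List.pyGet?, PySem.List.pyIdx?] at h
      simp [h]

theorem pvVisits_range (m : List (Int × List Int)) (N : Int)
    (hm : ∀ kv ∈ m, kv.2 ≠ [] ∧
      ((PySem.Dict.get? (PySem.Dict.mk m) kv.2.headI).isSome = true → 1 ≤ kv.2.headI ∧ kv.2.headI ≤ N)) :
    ∀ n s, ((PySem.Dict.get? (PySem.Dict.mk m) s).isSome = true → 1 ≤ s ∧ s ≤ N) →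
      ∀ x ∈ pvVisits m n s, 1 ≤ x ∧ x ≤ N := by
  intro n
  induction n with
  | zero => intro s _ x hx; simp [pvVisits] at hx
  | succ n ih =>
    intro s hs x hx
    cases hstep : pvStep m s with
    | none => rw [pvVisits, hstep] at hx; simp at hx
    | some t =>
      rw [pvVisits, hstep] at hx
      obtain ⟨hsome, kv, hkv, rfl⟩ := pvStep_some m s t hstep
      rcases List.mem_cons.mp hx with rfl | hx'
      · exact hs hsome
      · exact ih kv.2.headI (hm kv hkv).2 x hx'


-- The loop of A increments exactly the states of pvVisits, in order.
theorem run_dfa_loop_eq (m : List (Int × List Int)) :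
    ∀ (n : Nat) (s : Int) (f : PySem.Dict Int Int),
      (∀ x ∈ pvVisits m n s, (f.get? x).isSome = true) →
      run_dfa_loop m n s f = (pvVisits m n s).foldl (fun d x => d.modify x 0 (· + 1)) f := by
  intro n
  induction n with
  | zero => intro s f _; rfl
  | succ n ih =>
    intro s f hf
    cases hg : PySem.Dict.get? (PySem.Dict.mk m) s with
    | none =>
      have hstep : pvStep m s = none := by unfold pvStep; rw [hg]
      simp only [run_dfa_loop, hg, pvVisits, hstep, List.foldl_nil]
    | some lst =>
      cases hpg : PySem.List.pyGet? lst 0 with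
      | none =>
        have hstep : pvStep m s = none := by unfold pvStep; rw [hg]; exact hpg
        simp only [run_dfa_loop, hg, hpg, pvVisits, hstep, List.foldl_nil]
      | some t =>
        have hstep : pvStep m s = some t := by unfold pvStep; rw [hg]; exact hpg
        have hmem : s ∈ pvVisits m (n + 1) s := by rw [pvVisits, hstep]; simp
        have hsome := hf s hmem
        cases hv : f.get? s with
        | none => rw [hv] at hsome; simp at hsome
        | some v =>
          have hmod : f.modify s 0 (· + 1) = f.insert s (v + 1) := by
            unfold PySem.Dict.modify
            rw [PySem.Dict.getD_of_get?_eq_some f 0 hv]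
          simp only [run_dfa_loop, hg, hpg, hv, pvVisits, hstep, List.foldl_cons]
          rw [hmod]
          refine ih t _ ?_
          intro x hx
          rw [PySem.Dict.get?_insert]
          split
          · simp
          · exact hf x (by rw [pvVisits, hstep]; exact List.mem_cons_of_mem _ hx)

-- value of a generic weighted modify-fold (B's counting loops)
theorem pvGetD_foldl_modify_w (w : Int × Int → Int) :
    ∀ (l : List (Int × Int)) (d : PySem.Dict Int Int) (k : Int),
      (l.foldl (fun d p => d.modify p.2 0 (· + w p)) d).getD k 0
        = d.getD k 0 + ((l.filter (fun p => p.2 == k)).map w).sum := by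
  intro l
  induction l with
  | nil => intro d k; simp
  | cons p l ih =>
    intro d k
    rw [List.foldl_cons, ih]
    rw [PySem.Dict.getD_modify]
    by_cases hk : k = p.2
    · subst hk; simp; ring
    · have : (p.2 == k) = false := by simp [Ne.symm hk]
      simp [hk, this]

-- the weighted sum over the enumerated cycle, in closed form
theorem pvSum_w (q r k : Int) :
    ∀ (cyc : List Int) (s : Int),
      ((((PySem.List.enumerate cyc s).filter (fun p => p.2 == k)).map
          (fun p => q + (if p.1 < r then 1 else 0))).sum : Int)
        = q * (cyc.count k : Int) + ((cyc.take (r - s).toNat).count k : Int) := by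
  intro cyc
  induction cyc with
  | nil => intro s; simp [PySem.List.enumerate]
  | cons x xs ih =>
    intro s
    rw [PySem.List.enumerate_cons]
    by_cases hsr : s < r
    · have htake : (x :: xs).take (r - s).toNat = x :: xs.take (r - (s + 1)).toNat := by
        have he : (r - s).toNat = (r - (s + 1)).toNat + 1 := by omega
        rw [he, List.take_succ_cons]
      have h1 : (if s < r then (1 : Int) else 0) = 1 := if_pos hsr
      by_cases hx : x = k
      · subst hx
        simp only [List.filter_cons, beq_self_eq_true, if_true, List.map_cons, List.sum_cons,
          ih (s + 1), htake, List.count_cons_self, h1]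
        push_cast
        ring
      · have hbx : (x == k) = false := by simp [hx]
        simp only [List.filter_cons, hbx, Bool.false_eq_true, if_false, ih (s + 1), htake]
        have : (x :: xs.take (r - (s + 1)).toNat).count k = (xs.take (r - (s + 1)).toNat).count k := by
          simp [hx]
        rw [this]
        simp [List.count_cons]
        exact Or.inl hx
    · have htake0 : (r - s).toNat = 0 := by omega
      have htake1 : (r - (s + 1)).toNat = 0 := by omega
      have h1 : (if s < r then (1 : Int) else 0) = 0 := if_neg hsr
      by_cases hx : x = k
      · subst hx
        simp only [List.filter_cons, beq_self_eq_true, if_true, List.map_cons, List.sum_cons,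
          ih (s + 1), htake0, htake1, List.take_zero, List.count_cons_self, h1]
        push_cast
        ring
      · have hbx : (x == k) = false := by simp [hx]
        simp only [List.filter_cons, hbx, Bool.false_eq_true, if_false, ih (s + 1), htake0,
          htake1, List.take_zero]
        simp [List.count_cons]
        exact Or.inl hx

-- pumping the cycle q times
theorem pvCount_pump (m : List (Int × List Int)) (c : Nat) (s0 : Int)
    (hc : pvIter m c s0 = some s0) (k : Int) :
    ∀ (q r : Nat), ((pvVisits m (q * c + r) s0).count k : Int)
      = q * ((pvVisits m c s0).count k : Int) + ((pvVisits m r s0).count k : Int) := by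
  intro q
  induction q with
  | zero => intro r; simp
  | succ q ih =>
    intro r
    have he : (q + 1) * c + r = c + (q * c + r) := by ring
    rw [he, pvVisits_split m c (q * c + r) s0 s0 hc, List.count_append]
    push_cast [ih r]
    ring

-- the initial all-zero dictionary
def pvD0 (N : Int) : PySem.Dict Int Int :=
  (PySem.List.pyRange 1 (N + 1) 1).foldl (fun d k => d.insert k 0) (PySem.Dict.mk [])

theorem pvD0_items (N : Int) :
    (pvD0 N).items = (PySem.List.pyRange 1 (N + 1) 1).map (fun k => (k, (0 : Int))) := by
  have h := PySem.Dict.items_foldl_insert_fresh (PySem.List.pyRange 1 (N + 1) 1)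
    (fun a => a) (fun _ => (0 : Int)) (PySem.Dict.mk [])
    (fun a _ => by simp [PySem.Dict.contains]) (by simpa using PySem.List.nodup_pyRange_one 1 (N + 1))
  simpa using h

theorem pvD0_keys (N : Int) : (pvD0 N).keys = PySem.List.pyRange 1 (N + 1) 1 := by
  simp only [PySem.Dict.keys, pvD0_items, List.map_map]
  have h : ((fun x : Int × Int => x.1) ∘ fun k : Int => (k, (0 : Int))) = id := rfl
  rw [h, List.map_id]

theorem pvD0_nodup (N : Int) : (pvD0 N).keys.Nodup := by
  rw [pvD0_keys]; exact PySem.List.nodup_pyRange_one 1 (N + 1)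

theorem pvD0_getD (N k : Int) : (pvD0 N).getD k 0 = 0 := by
  cases hc : (pvD0 N).contains k with
  | false => exact PySem.Dict.getD_of_not_contains _ _ hc
  | true =>
    have hk : k ∈ (pvD0 N).keys := (PySem.Dict.contains_iff_mem_keys _ _).mp hc
    rw [pvD0_keys] at hk
    have : (k, (0 : Int)) ∈ (pvD0 N).items := by
      rw [pvD0_items]; exact List.mem_map.mpr ⟨k, hk, rfl⟩
    exact PySem.Dict.getD_of_mem_items (pvD0 N) this (pvD0_nodup N) 0

theorem pvD0_get?_isSome (N k : Int) (h1 : 1 ≤ k) (h2 : k ≤ N) :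
    ((pvD0 N).get? k).isSome = true := by
  rw [← PySem.Dict.contains_eq_isSome_get?]
  refine (PySem.Dict.contains_iff_mem_keys _ _).mpr ?_
  rw [pvD0_keys]
  exact PySem.List.mem_pyRange_one.mpr ⟨h1, by omega⟩

-- a +1-counting fold over the all-zero dictionary, as an items list
theorem pvItems_incr_fold (N : Int) (V : List Int) (hV : ∀ x ∈ V, 1 ≤ x ∧ x ≤ N) :
    (V.foldl (fun d s => d.modify s 0 (· + 1)) (pvD0 N)).items
      = (PySem.List.pyRange 1 (N + 1) 1).map (fun k => (k, (V.count k : Int))) := by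
  have hsub : ∀ x ∈ V, x ∈ (pvD0 N).keys := by
    intro x hx
    rw [pvD0_keys]
    exact PySem.List.mem_pyRange_one.mpr ⟨(hV x hx).1, by have := (hV x hx).2; omega⟩
  have hkeys : (V.foldl (fun d s => d.modify s 0 (· + 1)) (pvD0 N)).keys
      = PySem.List.pyRange 1 (N + 1) 1 := by
    rw [PySem.Dict.keys_foldl_modify V 0 (fun _ _ => (· + 1)) (pvD0 N),
      pvSet_update_self _ _ hsub, pvD0_keys]
  have hnd : (V.foldl (fun d s => d.modify s 0 (· + 1)) (pvD0 N)).keys.Nodup := by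
    rw [hkeys]; exact PySem.List.nodup_pyRange_one 1 (N + 1)
  rw [PySem.Dict.items_eq_map_keys _ hnd 0, hkeys]
  refine List.map_congr_left ?_
  intro k _
  rw [PySem.Dict.getD_foldl_modify_add_one V (pvD0 N) k, pvD0_getD]
  simp

theorem pvVisits_nil_of_not_mem (m : List (Int × List Int)) (S : Int)
    (h : (PySem.Dict.get? (PySem.Dict.mk m) S).isSome = false) :
    ∀ n, pvVisits m n S = [] := by
  intro n
  cases n with
  | zero => rfl
  | succ n =>
    have : pvStep m S = none := by
      unfold pvStep
      cases hg : PySem.Dict.get? (PySem.Dict.mk m) S with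
      | none => rfl
      | some lst => rw [hg] at h; simp at h
    rw [pvVisits, this]

-- characterisation of B's walk
theorem pvWalk_spec (m : List (Int × List Int)) (S : Int) :
    ∀ (fuel t : Nat) (cur : Int) (seen : PySem.Dict Int Int) (order : List Int),
      pvIter m t S = some cur →
      order = pvVisits m t S →
      order.length = t →
      (∀ x : Int, seen.get? x = (PySem.List.index? order x).map Int.ofNat) →
      run_dfa_walk m fuel cur seen order = (pvVisits m (t + fuel) S, none)
      ∨ ∃ (t' pn : Nat) (c' : Int),
          run_dfa_walk m fuel cur seen order = (pvVisits m t' S, some ((pn : Nat) : Int)) ∧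
          pn < t' ∧ t' < t + fuel ∧ (pvVisits m t' S).length = t' ∧
          pvIter m t' S = some c' ∧ pvIter m pn S = some c' := by
  intro fuel
  induction fuel with
  | zero =>
    intro t cur seen order _ horder _ _
    left
    rw [run_dfa_walk, horder, Nat.add_zero]
  | succ fuel ih =>
    intro t cur seen order hiter horder hlen hseen
    cases hsc : seen.get? cur with
    | some p =>
      -- repeat found
      have hmap := hseen cur
      rw [hsc] at hmap
      cases hidx : PySem.List.index? order cur with
      | none => rw [hidx] at hmap; simp at hmap
      | some pn =>
        rw [hidx] at hmap
        simp only [Option.map_some, Option.some.injEq] at hmap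
        obtain ⟨hpn, hget, _⟩ := PySem.List.getElem_of_index?_eq_some hidx
        right
        have hlt : pn < t := by omega
        have hlen' : (pvVisits m t S).length = t := by rw [← horder]; exact hlen
        have hiterpn : pvIter m pn S = some cur := by
          obtain ⟨x, hx1, hx2⟩ := pvIter_getElem m t S cur hiter pn hlt
          rw [← horder] at hx2
          rw [List.getElem?_eq_getElem hpn, hget] at hx2
          rw [hx1, ← Option.some_inj.mp hx2]
        refine ⟨t, pn, cur, ?_, hlt, by omega, hlen', hiter, hiterpn⟩
        simp only [run_dfa_walk, hsc]
        rw [horder, hmap]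
        rfl
    | none =>
      have hnot : cur ∉ order := by
        have hmap := hseen cur
        rw [hsc] at hmap
        cases hidx : PySem.List.index? order cur with
        | none => exact (PySem.List.index?_eq_none_iff order cur).mp hidx
        | some pn => rw [hidx] at hmap; simp at hmap
      cases hg : PySem.Dict.get? (PySem.Dict.mk m) cur with
      | none =>
        have hstep : pvStep m cur = none := by unfold pvStep; rw [hg]
        left
        simp only [run_dfa_walk, hsc, hg]
        rw [pvVisits_split m t fuel.succ S cur hiter]
        have : pvVisits m fuel.succ cur = [] := by rw [pvVisits, hstep]
        rw [this, List.append_nil, horder]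
      | some lst =>
        cases hpg : PySem.List.pyGet? lst 0 with
        | none =>
          have hstep : pvStep m cur = none := by unfold pvStep; rw [hg]; exact hpg
          left
          simp only [run_dfa_walk, hsc, hg, hpg]
          rw [pvVisits_split m t fuel.succ S cur hiter]
          have : pvVisits m fuel.succ cur = [] := by rw [pvVisits, hstep]
          rw [this, List.append_nil, horder]
        | some nxt =>
          have hstep : pvStep m cur = some nxt := by unfold pvStep; rw [hg]; exact hpg
          have hiter1 : pvIter m (t + 1) S = some nxt := by
            rw [pvIter_add m t 1, hiter]
            simp only [Option.bind_some]
            rw [pvIter, hstep]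
            rfl
          have hvis1 : pvVisits m 1 cur = [cur] := by
            rw [pvVisits, hstep]
            rfl
          have horder1 : order ++ [cur] = pvVisits m (t + 1) S := by
            rw [pvVisits_split m t 1 S cur hiter, hvis1, horder]

          have hlen1 : (order ++ [cur]).length = t + 1 := by simp [hlen]
          have hseen1 : ∀ x : Int, (seen.insert cur (order.length : Int)).get? x
              = (PySem.List.index? (order ++ [cur]) x).map Int.ofNat := by
            intro x
            rw [PySem.Dict.get?_insert]
            by_cases hxc : x = cur
            · subst hxc
              rw [if_pos rfl, PySem.List.index?_append_singleton_self order x hnot]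
              simp
            · rw [if_neg hxc, hseen x]
              by_cases hxo : x ∈ order
              · rw [PySem.List.index?_append_of_mem [cur] hxo]
              · have h1 : PySem.List.index? order x = none :=
                  (PySem.List.index?_eq_none_iff order x).mpr hxo
                have h2 : PySem.List.index? (order ++ [cur]) x = none := by
                  refine (PySem.List.index?_eq_none_iff _ x).mpr ?_
                  simp [hxo, hxc]
                rw [h1, h2]
          have hrec := ih (t + 1) nxt (seen.insert cur (order.length : Int)) (order ++ [cur])
            hiter1 horder1 hlen1 hseen1
          have hw : run_dfa_walk m (fuel + 1) cur seen order
              = run_dfa_walk m fuel nxt (seen.insert cur (order.length : Int)) (order ++ [cur]) := by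
            simp only [run_dfa_walk, hsc, hg, hpg]
          rcases hrec with hl | ⟨t', pn, c', h1, h2, h3, h4, h5, h6⟩
          · left
            rw [hw, hl]
            have : t + 1 + fuel = t + (fuel + 1) := by omega
            rw [this]
          · right
            exact ⟨t', pn, c', by rw [hw]; exact h1, h2, by omega, h4, h5, h6⟩

-- keys after the +1 fold are still exactly 1..N
theorem pvKeys_incr_fold (N : Int) (V : List Int) (hV : ∀ x ∈ V, 1 ≤ x ∧ x ≤ N) :
    (V.foldl (fun d s => d.modify s 0 (· + 1)) (pvD0 N)).keys = PySem.List.pyRange 1 (N + 1) 1 := by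
  have hsub : ∀ x ∈ V, x ∈ (pvD0 N).keys := by
    intro x hx
    rw [pvD0_keys]
    exact PySem.List.mem_pyRange_one.mpr ⟨(hV x hx).1, by have := (hV x hx).2; omega⟩
  rw [PySem.Dict.keys_foldl_modify V 0 (fun _ _ => (· + 1)) (pvD0 N),
    pvSet_update_self _ _ hsub, pvD0_keys]

-- B's two counting loops, as an items list
theorem pvItems_weighted_fold (N : Int) (tail cyc : List Int) (q r : Int)
    (htail : ∀ x ∈ tail, 1 ≤ x ∧ x ≤ N) (hcyc : ∀ x ∈ cyc, 1 ≤ x ∧ x ≤ N) :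
    ((PySem.List.enumerate cyc 0).foldl
        (fun d p => d.modify p.2 0 (· + (q + (if p.1 < r then 1 else 0))))
        (tail.foldl (fun d s => d.modify s 0 (· + 1)) (pvD0 N))).items
      = (PySem.List.pyRange 1 (N + 1) 1).map
          (fun k => (k, (tail.count k : Int)
            + (q * (cyc.count k : Int) + ((cyc.take r.toNat).count k : Int)))) := by
  have hk1 : (tail.foldl (fun d s => d.modify s 0 (· + 1)) (pvD0 N)).keys
      = PySem.List.pyRange 1 (N + 1) 1 := pvKeys_incr_fold N tail htail
  have hsub : ∀ x ∈ (PySem.List.enumerate cyc 0).map (fun p => p.2),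
      x ∈ (tail.foldl (fun d s => d.modify s 0 (· + 1)) (pvD0 N)).keys := by
    rw [PySem.List.map_snd_enumerate, hk1]
    intro x hx
    exact PySem.List.mem_pyRange_one.mpr ⟨(hcyc x hx).1, by have := (hcyc x hx).2; omega⟩
  have hkeys : ((PySem.List.enumerate cyc 0).foldl
        (fun d p => d.modify p.2 0 (· + (q + (if p.1 < r then 1 else 0))))
        (tail.foldl (fun d s => d.modify s 0 (· + 1)) (pvD0 N))).keys
      = PySem.List.pyRange 1 (N + 1) 1 := by
    rw [PySem.Dict.keys_foldl_modify_key (PySem.List.enumerate cyc 0) (fun p => p.2) 0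
      (fun _ p => (· + (q + (if p.1 < r then 1 else 0)))) _,
      pvSet_update_self _ _ hsub, hk1]
  have hnd : ((PySem.List.enumerate cyc 0).foldl
        (fun d p => d.modify p.2 0 (· + (q + (if p.1 < r then 1 else 0))))
        (tail.foldl (fun d s => d.modify s 0 (· + 1)) (pvD0 N))).keys.Nodup := by
    rw [hkeys]; exact PySem.List.nodup_pyRange_one 1 (N + 1)
  rw [PySem.Dict.items_eq_map_keys _ hnd 0, hkeys]
  refine List.map_congr_left ?_
  intro k _
  rw [pvGetD_foldl_modify_w (fun p => q + (if p.1 < r then 1 else 0)) (PySem.List.enumerate cyc 0) _ k,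
    PySem.Dict.getD_foldl_modify_add_one tail (pvD0 N) k, pvD0_getD, pvSum_w q r k cyc 0]
  simp

-- ===== VERDICT (by name: the statement is the Claim_ definition above) =====
theorem run_dfa_spec : Claim_equal_run_dfa := by
  intro N S X machine _ hpre
  unfold Spec_run_dfa
  have hwalk := pvWalk_spec machine S X.toNat 0 S (PySem.Dict.mk []) [] rfl rfl rfl
    (by
      intro x
      rw [(PySem.List.index?_eq_none_iff ([] : List Int) x).mpr (by simp)]
      simp [PySem.Dict.get?])
  have hrange : ∀ x ∈ pvVisits machine X.toNat S, 1 ≤ x ∧ x ≤ N := by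
    rcases hpre with hx0 | hnm | ⟨hS, hm⟩
    · have h0 : X.toNat = 0 := by omega
      rw [h0]
      intro x hx
      simp [pvVisits] at hx
    · rw [pvVisits_nil_of_not_mem machine S hnm X.toNat]
      intro x hx
      simp at hx
    · exact pvVisits_range machine N hm X.toNat S (fun _ => hS)
  have hAmap : run_dfa N S X machine
      = (PySem.List.pyRange 1 (N + 1) 1).map
          (fun k => (k, ((pvVisits machine X.toNat S).count k : Int))) := by
    unfold run_dfa
    rw [show initialize_frequency N = pvD0 N from rfl,
      run_dfa_loop_eq machine X.toNat S (pvD0 N)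
        (fun x hx => pvD0_get?_isSome N x (hrange x hx).1 (hrange x hx).2),
      pvItems_incr_fold N (pvVisits machine X.toNat S) hrange]
  rcases hwalk with hl | ⟨t', pn, c', heq, hpn, ht', hlen', hit', hipn⟩
  · -- the walk never met a repeated state: B replays exactly the visit sequence
    rw [Nat.zero_add] at hl
    rw [hAmap]
    simp only [run_dfa_alt, hl]
    rw [show ((PySem.List.pyRange 1 (N + 1) 1).foldl (fun d k => d.insert k 0)
        (PySem.Dict.mk ([] : List (Int × Int)))) = pvD0 N from rfl,
      pvItems_incr_fold N (pvVisits machine X.toNat S) hrange]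
  · -- repeat found after t' steps at first-visit index pn
    rw [Nat.zero_add] at ht'
    have hXpos : 0 < X.toNat := by omega
    have hX : ((X.toNat : Int)) = X := by omega
    -- abbreviations
    have epn : pn + (t' - pn) = t' := by omega
    have eM : pn + (X.toNat - pn) = X.toNat := by omega
    have hc : pvIter machine (t' - pn) c' = some c' := by
      have h1 := pvIter_add machine pn (t' - pn) S
      rw [epn, hit', hipn] at h1
      simpa using h1.symm
    have hlentail : (pvVisits machine pn S).length = pn := pvVisits_length machine pn S c' hipn
    have horder : pvVisits machine t' S
        = pvVisits machine pn S ++ pvVisits machine (t' - pn) c' := by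
      have h1 := pvVisits_split machine pn (t' - pn) S c' hipn
      rw [epn] at h1
      exact h1
    have hVsplit : pvVisits machine X.toNat S
        = pvVisits machine pn S ++ pvVisits machine (X.toNat - pn) c' := by
      have h1 := pvVisits_split machine pn (X.toNat - pn) S c' hipn
      rw [eM] at h1
      exact h1
    have hcle : t' - pn ≤ X.toNat - pn := by omega
    have hcyc_take : pvVisits machine (t' - pn) c'
        = (pvVisits machine (X.toNat - pn) c').take (t' - pn) :=
      pvVisits_prefix machine (t' - pn) (X.toNat - pn) c' hcle
    have htail_mem : ∀ x ∈ pvVisits machine pn S, 1 ≤ x ∧ x ≤ N := by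
      intro x hx
      exact hrange x (by rw [hVsplit]; exact List.mem_append_left _ hx)
    have hcyc_mem : ∀ x ∈ pvVisits machine (t' - pn) c', 1 ≤ x ∧ x ≤ N := by
      intro x hx
      refine hrange x ?_
      rw [hVsplit]
      refine List.mem_append_right _ ?_
      rw [hcyc_take] at hx
      exact List.mem_of_mem_take hx
    -- B's arithmetic, in Nat form
    have hcpos : 0 < t' - pn := by omega
    -- reduce B's branch
    simp only [run_dfa_alt, heq]
    rw [show ((PySem.List.pyRange 1 (N + 1) 1).foldl (fun d k => d.insert k 0)
        (PySem.Dict.mk ([] : List (Int × Int)))) = pvD0 N from rfl]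
    rw [hlen']
    have ec : ((t' : Int)) - ((pn : Int) : Int) = (((t' - pn : Nat)) : Int) := by omega
    have eXp : X - ((pn : Int)) = (((X.toNat - pn : Nat)) : Int) := by omega
    rw [ec, eXp, PySem.Int.floordiv_natCast (X.toNat - pn) (t' - pn),
      PySem.Int.mod_natCast (X.toNat - pn) (t' - pn)]
    rw [PySem.List.slice_to (pvVisits machine t' S) (by positivity),
      PySem.List.slice_from (pvVisits machine t' S) (by positivity)]
    rw [show ((pn : Int)).toNat = pn from by omega]
    rw [horder, List.take_left' hlentail, List.drop_left' hlentail]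
    rw [pvItems_weighted_fold N (pvVisits machine pn S) (pvVisits machine (t' - pn) c')
      _ _ htail_mem hcyc_mem]
    rw [hAmap]
    refine List.map_congr_left ?_
    intro k _
    refine congrArg (Prod.mk k) ?_
    -- counting identity
    have hmodlt : (X.toNat - pn) % (t' - pn) < t' - pn := Nat.mod_lt _ hcpos
    have hdm : ((X.toNat - pn) / (t' - pn)) * (t' - pn) + (X.toNat - pn) % (t' - pn)
        = X.toNat - pn := by rw [Nat.mul_comm]; exact Nat.div_add_mod _ _
    have hpump := pvCount_pump machine (t' - pn) c' hc k
      ((X.toNat - pn) / (t' - pn)) ((X.toNat - pn) % (t' - pn))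
    rw [hdm] at hpump
    have hrtake : pvVisits machine ((X.toNat - pn) % (t' - pn)) c'
        = (pvVisits machine (t' - pn) c').take ((X.toNat - pn) % (t' - pn)) :=
      pvVisits_prefix machine _ _ c' (le_of_lt hmodlt)
    rw [hVsplit, List.count_append, Nat.cast_add, hpump, hrtake,
      show ((((X.toNat - pn) % (t' - pn) : Nat) : Int)).toNat
        = (X.toNat - pn) % (t' - pn) from by omega]
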